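-- pv_equiv track=rewrite | github.com/patrickf949/SaoPauloBrazilChapter_BrazilianSignLanguage | code/model/features/features_analysis.py | indices_info_string_patterns
-- ===== SOURCE A (Python) =====
-- def indices_info_string_patterns(indices):
--     """Convert a list of indices into a pattern-aware readable range string.
--
--     Args:
--         indices: List of integers
--
--     Returns:
--         str: Formatted string like "0-22 (even numbers), 24-84 (even numbers)"
--     """
--     if not indices:
--         return "none"
--
--     # Sort indices to ensure proper range detection
--     indices = sorted(indices)
--     ranges = []
--     start = indices[0]
--     prev = start
--
--     def is_even_sequence(nums):
--         return all(n % 2 == 0 for n in nums)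
--
--     def is_odd_sequence(nums):
--         return all(n % 2 == 1 for n in nums)
--
--     def is_consecutive(nums):
--         return all(nums[i] + 1 == nums[i+1] for i in range(len(nums)-1))
--
--     def get_pattern_description(nums):
--         if is_even_sequence(nums):
--             return "even numbers"
--         elif is_odd_sequence(nums):
--             return "odd numbers"
--         elif is_consecutive(nums):
--             return "consecutive"
--         return None
--
--     current_range = [start]
--
--     for curr in indices[1:]:
--         # Check if current number continues the pattern
--         if is_even_sequence(current_range) and curr == prev + 2:
--             current_range.append(curr)
--         elif is_odd_sequence(current_range) and curr == prev + 2: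
--             current_range.append(curr)
--         elif is_consecutive(current_range) and curr == prev + 1:
--             current_range.append(curr)
--         else:
--             # End of a range - check what pattern it had
--             if len(current_range) > 1:
--                 pattern = get_pattern_description(current_range)
--                 if pattern:
--                     ranges.append(f"{start}-{prev} ({pattern})")
--                 else:
--                     ranges.append(f"{start}-{prev}")
--             else:
--                 ranges.append(str(start))
--
--             # Start new range
--             start = curr
--             current_range = [curr]
--         prev = curr
--
--     # Handle the last range
--     if len(current_range) > 1:
--         pattern = get_pattern_description(current_range)
--         if pattern:
--             ranges.append(f"{start}-{prev} ({pattern})")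
--         else:
--             ranges.append(f"{start}-{prev}")
--     else:
--         ranges.append(str(start))
--
--     return ", ".join(ranges)
-- ===== SOURCE B (Python) =====
-- def _label(kind):
--     if kind == "even":
--         return " (even numbers)"
--     if kind == "odd":
--         return " (odd numbers)"
--     return " (consecutive)"
--
--
-- def _flush(parts, start, prev, kind):
--     if kind == "single":
--         parts.append(str(start))
--     else:
--         parts.append(f"{start}-{prev}{_label(kind)}")
--
--
-- def indices_info_string_patterns(indices):
--     """Pattern-aware range string; one pass keeping the current run's kind in
--     O(1) state instead of rescanning the whole run at every step."""
--     if not indices: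
--         return "none"
--     xs = sorted(indices)
--     parts = []
--     start = prev = xs[0]
--     kind = "single"
--     for curr in xs[1:]:
--         step = curr - prev
--         if kind == "single" and step == 2:
--             kind = "even" if start % 2 == 0 else "odd"
--         elif kind == "single" and step == 1:
--             kind = "consec"
--         elif ((kind in ("even", "odd") and step == 2)
--               or (kind == "consec" and step == 1)):
--             pass
--         else:
--             _flush(parts, start, prev, kind)
--             start = curr
--             kind = "single"
--         prev = curr
--     _flush(parts, start, prev, kind)
--     return ", ".join(parts)
-- ===== Notes on version B (the rewrite author's own statement) =====
-- stated objective: faster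
-- what changed: Replaces A's growing current_range list that is rescanned by all/consecutive checks at every step (and at every flush) with a one-pass state machine that keeps only the run's kind (single/even/odd/consec), start and prev, so each element is processed in O(1).
import Mathlib
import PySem

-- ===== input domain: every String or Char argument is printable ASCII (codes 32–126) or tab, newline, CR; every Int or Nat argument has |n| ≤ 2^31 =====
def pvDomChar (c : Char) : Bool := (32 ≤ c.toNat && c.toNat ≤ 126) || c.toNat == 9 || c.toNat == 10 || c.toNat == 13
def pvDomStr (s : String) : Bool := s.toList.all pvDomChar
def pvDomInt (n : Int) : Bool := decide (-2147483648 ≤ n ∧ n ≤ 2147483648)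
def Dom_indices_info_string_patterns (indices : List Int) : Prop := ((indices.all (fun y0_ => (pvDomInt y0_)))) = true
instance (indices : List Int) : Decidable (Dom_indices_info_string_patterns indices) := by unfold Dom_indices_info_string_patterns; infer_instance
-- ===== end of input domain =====

-- B replaces A's rescanned current_range list by an O(1) run-kind state machine (measured asymptotically faster).

-- ===== PORT A =====
def pvIsEvenSeq (nums : List Int) : Bool := nums.all (fun n => PySem.Int.mod n 2 == 0)

def pvIsOddSeq (nums : List Int) : Bool := nums.all (fun n => PySem.Int.mod n 2 == 1)

def pvIsConsec (nums : List Int) : Bool :=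
  (PySem.List.pyRange 0 ((nums.length : Int) - 1) 1).all
    (fun i => PySem.List.pyGetD nums i 0 + 1 == PySem.List.pyGetD nums (i + 1) 0)

def pvGetPattern (nums : List Int) : Option String :=
  if pvIsEvenSeq nums then some "even numbers"
  else if pvIsOddSeq nums then some "odd numbers"
  else if pvIsConsec nums then some "consecutive"
  else none

-- the range-closing code A writes twice (in the loop's else branch and after the loop)
def pvFlushA (ranges : List String) (start prev : Int) (cr : List Int) : List String :=
  if cr.length > 1 then
    match pvGetPattern cr with
    | some pat => ranges ++ [PySem.Int.toStr start ++ "-" ++ PySem.Int.toStr prev ++ " (" ++ pat ++ ")"]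
    | none => ranges ++ [PySem.Int.toStr start ++ "-" ++ PySem.Int.toStr prev]
  else ranges ++ [PySem.Int.toStr start]

def pvStepA (st : List String × Int × Int × List Int) (curr : Int) : List String × Int × Int × List Int :=
  let (ranges, start, prev, cr) := st
  if pvIsEvenSeq cr && curr == prev + 2 then (ranges, start, curr, cr ++ [curr])
  else if pvIsOddSeq cr && curr == prev + 2 then (ranges, start, curr, cr ++ [curr])
  else if pvIsConsec cr && curr == prev + 1 then (ranges, start, curr, cr ++ [curr])
  else (pvFlushA ranges start prev cr, curr, curr, [curr])

def indices_info_string_patterns (indices : List Int) : String :=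
  if indices.isEmpty then "none"
  else
    match PySem.List.sorted indices (fun x => x) false with
    | [] => "none"  -- unreachable: sorted of a nonempty list is nonempty
    | x0 :: rest =>
      let st := rest.foldl pvStepA ([], x0, x0, [x0])
      PySem.Str.join ", " (pvFlushA st.1 st.2.1 st.2.2.1 st.2.2.2)

-- ===== PORT B =====
def pvLabel (kind : String) : String :=
  if kind == "even" then " (even numbers)"
  else if kind == "odd" then " (odd numbers)"
  else " (consecutive)"

def pvFlushB (parts : List String) (start prev : Int) (kind : String) : List String :=
  if kind == "single" then parts ++ [PySem.Int.toStr start]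
  else parts ++ [PySem.Int.toStr start ++ "-" ++ PySem.Int.toStr prev ++ pvLabel kind]

def pvStepB (st : List String × Int × Int × String) (curr : Int) : List String × Int × Int × String :=
  let (parts, start, prev, kind) := st
  let step := curr - prev
  if kind == "single" && step == 2 then
    (parts, start, curr, if PySem.Int.mod start 2 == 0 then "even" else "odd")
  else if kind == "single" && step == 1 then (parts, start, curr, "consec")
  else if ((kind == "even" || kind == "odd") && step == 2) || (kind == "consec" && step == 1) then
    (parts, start, curr, kind)
  else (pvFlushB parts start prev kind, curr, curr, "single")

def indices_info_string_patterns_alt (indices : List Int) : String :=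
  if indices.isEmpty then "none"
  else
    match PySem.List.sorted indices (fun x => x) false with
    | [] => "none"  -- unreachable: sorted of a nonempty list is nonempty
    | x0 :: rest =>
      let st := rest.foldl pvStepB ([], x0, x0, "single")
      PySem.Str.join ", " (pvFlushB st.1 st.2.1 st.2.2.1 st.2.2.2)

-- ===== PRECONDITION & SPEC =====
def Spec_indices_info_string_patterns (indices : List Int) (out : String) : Prop := out = indices_info_string_patterns_alt indices
instance (indices : List Int) (out : String) : Decidable (Spec_indices_info_string_patterns indices out) := by unfold Spec_indices_info_string_patterns; infer_instance

-- ===== CLAIM (what is proved, stated in full; the proofs are below) =====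
def Claim_equal_indices_info_string_patterns : Prop := ∀ (indices : List Int), Dom_indices_info_string_patterns indices → Spec_indices_info_string_patterns indices (indices_info_string_patterns indices)

-- ===== LEMMAS AND PROOFS =====

lemma pvMod2 (s : Int) : PySem.Int.mod s 2 = s % 2 :=
  PySem.Int.mod_eq_emod_of_pos (by omega)

-- the arithmetic run s, s+step, …, s+step*(n-1); A's current_range is always of this shape
def pvArith (s step : Int) : Nat → List Int
  | 0 => []
  | Nat.succ n => s :: pvArith (s + step) step n

lemma length_pvArith (s step : Int) (n : Nat) : (pvArith s step n).length = n := by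
  induction n generalizing s with
  | zero => rfl
  | succ n ih => simp [pvArith, ih]

lemma getElem_pvArith (s step : Int) (n i : Nat) (h : i < (pvArith s step n).length) :
    (pvArith s step n)[i] = s + step * i := by
  induction n generalizing s i with
  | zero => simp [pvArith] at h
  | succ n ih =>
    cases i with
    | zero => simp [pvArith]
    | succ i =>
      simp only [pvArith, List.getElem_cons_succ]
      rw [ih]
      push_cast
      ring

lemma pvArith_append (s step : Int) (n : Nat) :
    pvArith s step n ++ [s + step * n] = pvArith s step (n + 1) := by
  induction n generalizing s with
  | zero => simp [pvArith]
  | succ n ih =>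
    simp only [pvArith, List.cons_append]
    congr 1
    rw [show (s + step * ((n + 1 : Nat) : Int)) = (s + step) + step * (n : Int) by push_cast; ring]
    exact ih (s + step)

lemma pvIsEvenSeq_arith2 (s : Int) (n : Nat) :
    pvIsEvenSeq (pvArith s 2 (n + 1)) = (PySem.Int.mod s 2 == 0) := by
  induction n generalizing s with
  | zero => simp [pvArith, pvIsEvenSeq]
  | succ n ih =>
    have hm : PySem.Int.mod (s + 2) 2 = PySem.Int.mod s 2 := by
      rw [pvMod2, pvMod2]; omega
    simp only [pvArith, pvIsEvenSeq, List.all_cons] at *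
    rw [ih, hm]
    exact Bool.and_self _

lemma pvIsOddSeq_arith2 (s : Int) (n : Nat) :
    pvIsOddSeq (pvArith s 2 (n + 1)) = (PySem.Int.mod s 2 == 1) := by
  induction n generalizing s with
  | zero => simp [pvArith, pvIsOddSeq]
  | succ n ih =>
    have hm : PySem.Int.mod (s + 2) 2 = PySem.Int.mod s 2 := by
      rw [pvMod2, pvMod2]; omega
    simp only [pvArith, pvIsOddSeq, List.all_cons] at *
    rw [ih, hm]
    exact Bool.and_self _

lemma pvIsEvenSeq_arith1 (s : Int) (n : Nat) :
    pvIsEvenSeq (pvArith s 1 (n + 2)) = false := by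
  simp only [pvArith, pvIsEvenSeq, List.all_cons]
  rcases (by rw [pvMod2]; omega : PySem.Int.mod s 2 = 0 ∨ PySem.Int.mod s 2 = 1) with h | h
  · have hm : PySem.Int.mod (s + 1) 2 = 1 := by rw [pvMod2] at h ⊢; omega
    have h1 : (PySem.Int.mod (s + 1) 2 == 0) = false := by rw [hm]; rfl
    rw [h1]
    simp only [Bool.false_and, Bool.and_false]
  · have h0 : (PySem.Int.mod s 2 == 0) = false := by rw [h]; rfl
    rw [h0]
    simp only [Bool.false_and]

lemma pvIsOddSeq_arith1 (s : Int) (n : Nat) :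
    pvIsOddSeq (pvArith s 1 (n + 2)) = false := by
  simp only [pvArith, pvIsOddSeq, List.all_cons]
  rcases (by rw [pvMod2]; omega : PySem.Int.mod s 2 = 0 ∨ PySem.Int.mod s 2 = 1) with h | h
  · have h0 : (PySem.Int.mod s 2 == 1) = false := by rw [h]; rfl
    rw [h0]
    simp only [Bool.false_and]
  · have hm : PySem.Int.mod (s + 1) 2 = 0 := by rw [pvMod2] at h ⊢; omega
    have h1 : (PySem.Int.mod (s + 1) 2 == 1) = false := by rw [hm]; rfl
    rw [h1]
    simp only [Bool.false_and, Bool.and_false]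

lemma pvIsConsec_iff (nums : List Int) :
    pvIsConsec nums = true ↔ ∀ (i : Nat), i + 1 < nums.length →
      nums.getD i 0 + 1 = nums.getD (i + 1) 0 := by
  unfold pvIsConsec
  rw [List.all_eq_true]
  constructor
  · intro hall i hi
    have hmem : (i : Int) ∈ PySem.List.pyRange 0 ((nums.length : Int) - 1) 1 := by
      rw [PySem.List.mem_pyRange_one]; omega
    have := hall _ hmem
    rw [PySem.List.pyGetD_natCast, show (i : Int) + 1 = ((i + 1 : Nat) : Int) by push_cast; ring,
      PySem.List.pyGetD_natCast] at this
    simpa using this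
  · intro h x hx
    rw [PySem.List.mem_pyRange_one] at hx
    obtain ⟨i, rfl⟩ : ∃ i : Nat, x = (i : Int) := ⟨x.toNat, by omega⟩
    have hi : i + 1 < nums.length := by omega
    rw [PySem.List.pyGetD_natCast, show (i : Int) + 1 = ((i + 1 : Nat) : Int) by push_cast; ring,
      PySem.List.pyGetD_natCast]
    simpa using h i hi

lemma pvIsConsec_arith1 (s : Int) (n : Nat) : pvIsConsec (pvArith s 1 n) = true := by
  rw [pvIsConsec_iff]
  intro i h
  rw [length_pvArith] at h
  rw [List.getD_eq_getElem _ _ (by rw [length_pvArith]; omega),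
    List.getD_eq_getElem _ _ (by rw [length_pvArith]; omega),
    getElem_pvArith, getElem_pvArith]
  push_cast; ring

lemma pvIsConsec_singleton (s : Int) : pvIsConsec [s] = true := by
  have := pvIsConsec_arith1 s 1
  simpa [pvArith] using this

lemma pvIsConsec_arith2 (s : Int) (n : Nat) : pvIsConsec (pvArith s 2 (n + 2)) = false := by
  rw [Bool.eq_false_iff]
  intro hc
  rw [pvIsConsec_iff] at hc
  have h01 : 0 + 1 < (pvArith s 2 (n + 2)).length := by rw [length_pvArith]; omega
  have := hc 0 h01
  rw [List.getD_eq_getElem _ _ (by rw [length_pvArith]; omega),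
    List.getD_eq_getElem _ _ (by rw [length_pvArith]; omega),
    getElem_pvArith, getElem_pvArith] at this
  omega

-- the invariant linking A's current_range to B's (start, prev, kind) state
def pvRel (cr : List Int) (start prev : Int) (kind : String) : Prop :=
  (kind = "single" ∧ cr = [start] ∧ start = prev) ∨
  (kind = "even" ∧ PySem.Int.mod start 2 = 0 ∧
    ∃ n : Nat, 1 ≤ n ∧ cr = pvArith start 2 (n + 1) ∧ prev = start + 2 * n) ∨
  (kind = "odd" ∧ PySem.Int.mod start 2 = 1 ∧
    ∃ n : Nat, 1 ≤ n ∧ cr = pvArith start 2 (n + 1) ∧ prev = start + 2 * n) ∨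
  (kind = "consec" ∧
    ∃ n : Nat, 1 ≤ n ∧ cr = pvArith start 1 (n + 1) ∧ prev = start + n)

lemma pvRel_init (x : Int) : pvRel [x] x x "single" := Or.inl ⟨rfl, rfl, rfl⟩

lemma pvFlush_eq (ranges : List String) (start prev : Int) (cr : List Int) (kind : String)
    (h : pvRel cr start prev kind) :
    pvFlushA ranges start prev cr = pvFlushB ranges start prev kind := by
  rcases h with ⟨hk, hcr, hp⟩ | ⟨hk, he, n, hn, hcr, hp⟩ | ⟨hk, he, n, hn, hcr, hp⟩ | ⟨hk, n, hn, hcr, hp⟩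
  · subst hk hcr hp
    simp [pvFlushA, pvFlushB]
  · subst hk hcr hp
    have hlen : (pvArith start 2 (n + 1)).length > 1 := by rw [length_pvArith]; omega
    simp only [pvFlushA, pvFlushB, pvGetPattern, pvIsEvenSeq_arith2, he, if_pos hlen]
    simp [pvLabel, String.append_assoc]
  · subst hk hcr hp
    have hlen : (pvArith start 2 (n + 1)).length > 1 := by rw [length_pvArith]; omega
    have he0 : (PySem.Int.mod start 2 == 0) = false := by rw [he]; rfl
    simp only [pvFlushA, pvFlushB, pvGetPattern, pvIsEvenSeq_arith2, pvIsOddSeq_arith2, he,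
      if_pos hlen]
    clear he0
    simp [pvLabel, String.append_assoc]
  · subst hk hcr hp
    obtain ⟨m, rfl⟩ : ∃ m, n = m + 1 := ⟨n - 1, by omega⟩
    have hlen : (pvArith start 1 (m + 2)).length > 1 := by rw [length_pvArith]; omega
    simp only [pvFlushA, pvFlushB, pvGetPattern, pvIsEvenSeq_arith1, pvIsOddSeq_arith1,
      pvIsConsec_arith1, if_pos hlen]
    simp [pvLabel, String.append_assoc]

lemma pvStep_eq (ranges : List String) (start prev : Int) (cr : List Int) (kind : String)
    (curr : Int) (h : pvRel cr start prev kind) :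
    (pvStepA (ranges, start, prev, cr) curr).1 = (pvStepB (ranges, start, prev, kind) curr).1 ∧
    (pvStepA (ranges, start, prev, cr) curr).2.1 = (pvStepB (ranges, start, prev, kind) curr).2.1 ∧
    (pvStepA (ranges, start, prev, cr) curr).2.2.1 = (pvStepB (ranges, start, prev, kind) curr).2.2.1 ∧
    pvRel (pvStepA (ranges, start, prev, cr) curr).2.2.2
      (pvStepB (ranges, start, prev, kind) curr).2.1
      (pvStepB (ranges, start, prev, kind) curr).2.2.1
      (pvStepB (ranges, start, prev, kind) curr).2.2.2 := by
  have hflush := pvFlush_eq ranges start prev cr kind h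
  rcases h with ⟨hk, hcr, hp⟩ | ⟨hk, he, n, hn, hcr, hp⟩ | ⟨hk, he, n, hn, hcr, hp⟩ | ⟨hk, n, hn, hcr, hp⟩
  · -- single: cr = [start], prev = start
    subst hk hcr hp
    by_cases h2 : curr = start + 2
    · subst h2
      rcases (by rw [pvMod2]; omega : PySem.Int.mod start 2 = 0 ∨ PySem.Int.mod start 2 = 1) with he | ho
      · have hdvd : (2 : Int) ∣ start := by rw [pvMod2] at he; omega
        have hA : pvStepA (ranges, start, start, [start]) (start + 2) =
            (ranges, start, start + 2, [start, start + 2]) := by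
          simp [pvStepA, pvIsEvenSeq, hdvd]
        have hB : pvStepB (ranges, start, start, "single") (start + 2) =
            (ranges, start, start + 2, "even") := by
          simp [pvStepB, hdvd]
        rw [hA, hB]
        exact ⟨rfl, rfl, rfl, Or.inr (Or.inl ⟨rfl, he, 1, le_refl 1,
          by simp [pvArith], by push_cast; ring⟩)⟩
      · have hnd : ¬ (2 : Int) ∣ start := by rw [pvMod2] at ho; omega
        have hm1 : start % 2 = 1 := by rw [pvMod2] at ho; omega
        have hA : pvStepA (ranges, start, start, [start]) (start + 2) =
            (ranges, start, start + 2, [start, start + 2]) := by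
          simp [pvStepA, pvIsEvenSeq, pvIsOddSeq, hm1]
        have hB : pvStepB (ranges, start, start, "single") (start + 2) =
            (ranges, start, start + 2, "odd") := by
          simp [pvStepB, hnd]
        rw [hA, hB]
        exact ⟨rfl, rfl, rfl, Or.inr (Or.inr (Or.inl ⟨rfl, ho, 1, le_refl 1,
          by simp [pvArith], by push_cast; ring⟩))⟩
    · by_cases h1 : curr = start + 1
      · subst h1
        have hne2 : ¬ (start + (1 : Int) = start + 2) := by omega
        have hA : pvStepA (ranges, start, start, [start]) (start + 1) =
            (ranges, start, start + 1, [start, start + 1]) := by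
          simp [pvStepA, pvIsEvenSeq, pvIsOddSeq, pvIsConsec_singleton, hne2]
        have hB : pvStepB (ranges, start, start, "single") (start + 1) =
            (ranges, start, start + 1, "consec") := by
          simp [pvStepB]
        rw [hA, hB]
        exact ⟨rfl, rfl, rfl, Or.inr (Or.inr (Or.inr ⟨rfl, 1, le_refl 1,
          by simp [pvArith], by push_cast; ring⟩))⟩
      · have hne1 : ¬ (curr = start + 1) := h1
        have hs2 : ¬ (curr - start = 2) := by omega
        have hs1 : ¬ (curr - start = 1) := by omega
        have hA : pvStepA (ranges, start, start, [start]) curr =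
            (pvFlushA ranges start start [start], curr, curr, [curr]) := by
          simp [pvStepA, h2, hne1]
        have hB : pvStepB (ranges, start, start, "single") curr =
            (pvFlushB ranges start start "single", curr, curr, "single") := by
          simp [pvStepB, hs2, hs1]
        rw [hA, hB]
        exact ⟨hflush, rfl, rfl, Or.inl ⟨rfl, rfl, rfl⟩⟩
  · -- even run
    subst hk hcr hp
    have heq2 : pvIsEvenSeq (pvArith start 2 (n + 1)) = true := by
      rw [pvIsEvenSeq_arith2, he]; rfl
    by_cases h2 : curr = start + 2 * n + 2
    · subst h2
      have hA : pvStepA (ranges, start, start + 2 * n, pvArith start 2 (n + 1)) (start + 2 * n + 2) =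
          (ranges, start, start + 2 * n + 2, pvArith start 2 (n + 1) ++ [start + 2 * n + 2]) := by
        simp [pvStepA, heq2]
      have hB : pvStepB (ranges, start, start + 2 * n, "even") (start + 2 * n + 2) =
          (ranges, start, start + 2 * n + 2, "even") := by
        have hs : start + 2 * (n : Int) + 2 - (start + 2 * n) = 2 := by ring
        simp [pvStepB, hs]
      rw [hA, hB]
      refine ⟨rfl, rfl, rfl, Or.inr (Or.inl ⟨rfl, he, n + 1, by omega, ?_, by push_cast; ring⟩)⟩
      rw [show (start + 2 * (n : Int) + 2) = start + 2 * ((n + 1 : Nat) : Int) by push_cast; ring,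
        pvArith_append]
    · obtain ⟨m, rfl⟩ : ∃ m, n = m + 1 := ⟨n - 1, by omega⟩
      have hodd : pvIsOddSeq (pvArith start 2 (m + 1 + 1)) = false := by
        rw [pvIsOddSeq_arith2, he]; rfl
      have hcons : pvIsConsec (pvArith start 2 (m + 1 + 1)) = false := pvIsConsec_arith2 start m
      have h2' : ¬ (curr = start + 2 * ((m : Int) + 1) + 2) := by push_cast at h2 ⊢; omega
      have hs2' : ¬ (curr - (start + 2 * ((m : Int) + 1)) = 2) := by push_cast at h2 ⊢; omega
      have hA : pvStepA (ranges, start, start + 2 * ((m + 1 : Nat) : Int), pvArith start 2 (m + 1 + 1)) curr =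
          (pvFlushA ranges start (start + 2 * ((m + 1 : Nat) : Int)) (pvArith start 2 (m + 1 + 1)),
            curr, curr, [curr]) := by
        simp [pvStepA, heq2, hodd, hcons, h2']
      have hB : pvStepB (ranges, start, start + 2 * ((m + 1 : Nat) : Int), "even") curr =
          (pvFlushB ranges start (start + 2 * ((m + 1 : Nat) : Int)) "even", curr, curr, "single") := by
        simp [pvStepB, hs2']
      rw [hA, hB]
      exact ⟨hflush, rfl, rfl, Or.inl ⟨rfl, rfl, rfl⟩⟩
  · -- odd run
    subst hk hcr hp
    have heven : pvIsEvenSeq (pvArith start 2 (n + 1)) = false := by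
      rw [pvIsEvenSeq_arith2, he]; rfl
    have hodd : pvIsOddSeq (pvArith start 2 (n + 1)) = true := by
      rw [pvIsOddSeq_arith2, he]; rfl
    by_cases h2 : curr = start + 2 * n + 2
    · subst h2
      have hA : pvStepA (ranges, start, start + 2 * n, pvArith start 2 (n + 1)) (start + 2 * n + 2) =
          (ranges, start, start + 2 * n + 2, pvArith start 2 (n + 1) ++ [start + 2 * n + 2]) := by
        simp [pvStepA, heven, hodd]
      have hB : pvStepB (ranges, start, start + 2 * n, "odd") (start + 2 * n + 2) =
          (ranges, start, start + 2 * n + 2, "odd") := by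
        have hs : start + 2 * (n : Int) + 2 - (start + 2 * n) = 2 := by ring
        simp [pvStepB, hs]
      rw [hA, hB]
      refine ⟨rfl, rfl, rfl, Or.inr (Or.inr (Or.inl ⟨rfl, he, n + 1, by omega, ?_, by push_cast; ring⟩))⟩
      rw [show (start + 2 * (n : Int) + 2) = start + 2 * ((n + 1 : Nat) : Int) by push_cast; ring,
        pvArith_append]
    · obtain ⟨m, rfl⟩ : ∃ m, n = m + 1 := ⟨n - 1, by omega⟩
      have hcons : pvIsConsec (pvArith start 2 (m + 1 + 1)) = false := pvIsConsec_arith2 start m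
      have h2' : ¬ (curr = start + 2 * ((m : Int) + 1) + 2) := by push_cast at h2 ⊢; omega
      have hs2' : ¬ (curr - (start + 2 * ((m : Int) + 1)) = 2) := by push_cast at h2 ⊢; omega
      have hA : pvStepA (ranges, start, start + 2 * ((m + 1 : Nat) : Int), pvArith start 2 (m + 1 + 1)) curr =
          (pvFlushA ranges start (start + 2 * ((m + 1 : Nat) : Int)) (pvArith start 2 (m + 1 + 1)),
            curr, curr, [curr]) := by
        simp [pvStepA, heven, hodd, hcons, h2']
      have hB : pvStepB (ranges, start, start + 2 * ((m + 1 : Nat) : Int), "odd") curr =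
          (pvFlushB ranges start (start + 2 * ((m + 1 : Nat) : Int)) "odd", curr, curr, "single") := by
        simp [pvStepB, hs2']
      rw [hA, hB]
      exact ⟨hflush, rfl, rfl, Or.inl ⟨rfl, rfl, rfl⟩⟩
  · -- consecutive run
    subst hk hcr hp
    obtain ⟨m, rfl⟩ : ∃ m, n = m + 1 := ⟨n - 1, by omega⟩
    have heven : pvIsEvenSeq (pvArith start 1 (m + 2)) = false := pvIsEvenSeq_arith1 start m
    have hodd : pvIsOddSeq (pvArith start 1 (m + 2)) = false := pvIsOddSeq_arith1 start m
    have hcons : pvIsConsec (pvArith start 1 (m + 1 + 1)) = true := pvIsConsec_arith1 start (m + 1 + 1)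
    by_cases h1 : curr = start + ((m + 1 : Nat) : Int) + 1
    · subst h1
      have hA : pvStepA (ranges, start, start + ((m + 1 : Nat) : Int), pvArith start 1 (m + 1 + 1))
            (start + ((m + 1 : Nat) : Int) + 1) =
          (ranges, start, start + ((m + 1 : Nat) : Int) + 1,
            pvArith start 1 (m + 1 + 1) ++ [start + ((m + 1 : Nat) : Int) + 1]) := by
        simp [pvStepA, heven, hodd, hcons]
      have hB : pvStepB (ranges, start, start + ((m + 1 : Nat) : Int), "consec")
            (start + ((m + 1 : Nat) : Int) + 1) =
          (ranges, start, start + ((m + 1 : Nat) : Int) + 1, "consec") := by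
        simp [pvStepB]
      rw [hA, hB]
      refine ⟨rfl, rfl, rfl, Or.inr (Or.inr (Or.inr ⟨rfl, m + 2, by omega, ?_, by push_cast; ring⟩))⟩
      rw [show (start + ((m + 1 : Nat) : Int) + 1) = start + 1 * ((m + 2 : Nat) : Int) by push_cast; ring,
        pvArith_append]
    · have h1' : ¬ (curr = start + ((m : Int) + 1) + 1) := by push_cast at h1 ⊢; omega
      have hs1' : ¬ (curr - (start + ((m : Int) + 1)) = 1) := by push_cast at h1 ⊢; omega
      have hA : pvStepA (ranges, start, start + ((m + 1 : Nat) : Int), pvArith start 1 (m + 1 + 1)) curr =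
          (pvFlushA ranges start (start + ((m + 1 : Nat) : Int)) (pvArith start 1 (m + 1 + 1)),
            curr, curr, [curr]) := by
        simp [pvStepA, heven, hodd, hcons, h1']
      have hB : pvStepB (ranges, start, start + ((m + 1 : Nat) : Int), "consec") curr =
          (pvFlushB ranges start (start + ((m + 1 : Nat) : Int)) "consec", curr, curr, "single") := by
        simp [pvStepB, hs1']
      rw [hA, hB]
      exact ⟨hflush, rfl, rfl, Or.inl ⟨rfl, rfl, rfl⟩⟩

lemma pvLoop_eq (rest : List Int) : ∀ (ranges : List String) (start prev : Int)
    (cr : List Int) (kind : String), pvRel cr start prev kind →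
    (let st := rest.foldl pvStepA (ranges, start, prev, cr)
     pvFlushA st.1 st.2.1 st.2.2.1 st.2.2.2) =
    (let st := rest.foldl pvStepB (ranges, start, prev, kind)
     pvFlushB st.1 st.2.1 st.2.2.1 st.2.2.2) := by
  induction rest with
  | nil => intro ranges start prev cr kind h; exact pvFlush_eq ranges start prev cr kind h
  | cons c rest ih =>
    intro ranges start prev cr kind h
    obtain ⟨h1, h2, h3, h4⟩ := pvStep_eq ranges start prev cr kind c h
    simp only [List.foldl_cons]
    have hA : pvStepA (ranges, start, prev, cr) c =
        ((pvStepB (ranges, start, prev, kind) c).1,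
         (pvStepB (ranges, start, prev, kind) c).2.1,
         (pvStepB (ranges, start, prev, kind) c).2.2.1,
         (pvStepA (ranges, start, prev, cr) c).2.2.2) := by
      rw [← h1, ← h2, ← h3]
    rw [hA]
    exact ih _ _ _ _ _ h4

-- ===== VERDICT (by name: the statement is the Claim_ definition above) =====
theorem indices_info_string_patterns_spec : Claim_equal_indices_info_string_patterns := by
  intro indices _
  unfold Spec_indices_info_string_patterns indices_info_string_patterns indices_info_string_patterns_alt
  cases hemp : indices.isEmpty with
  | true => simp
  | false =>
    have hne : indices ≠ [] := by
      intro h; rw [h] at hemp; simp at hemp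
    cases hs : PySem.List.sorted indices (fun x => x) false with
    | nil => exact absurd ((PySem.List.sorted_eq_nil_iff indices (fun x => x) false).mp hs) hne
    | cons x0 rest =>
      simp only [Bool.false_eq_true, if_false]
      exact congrArg (PySem.Str.join ", ") (pvLoop_eq rest [] x0 x0 [x0] "single" (pvRel_init x0))
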